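-- pv_equiv track=rewrite | github.com/daRasmussen/super-adventure | 2021/day21/main.py | calculate_cycles
-- ===== SOURCE A (Python) =====
-- from typing import List, Tuple, Dict
--
-- def calculate_cycles(p1_start: int, p2_start: int) -> Tuple[List[int], List[int]]:
--     cycle_length = 10
--     cycle_range = range(cycle_length)
--     p1_moves, p2_moves = \
--         [[((((6 * (i + 1) - j) * 3) - 1) % 10) + 1 for i in cycle_range] for j in (4, 1)]
--     p1_cycle, p2_cycle = [[i] * cycle_length for i in (p1_start, p2_start)]
--     for i in cycle_range:
--         p1_cycle[i] = ((p1_moves[i] - 1 + p1_cycle[i - 1]) % 10) + 1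
--         p2_cycle[i] = ((p2_moves[i] - 1 + p2_cycle[i - 1]) % 10) + 1
--     return p1_cycle, p2_cycle
-- ===== SOURCE B (Python) =====
-- def calculate_cycles(p1_start, p2_start):
--     # Closed form: position after step i is ((start - 1 + S_i) % 10) + 1, where
--     # S_i = (i+1)*(9*i + c) is the cumulative move sum (moves are 18k+6 / 18k+15).
--     p1_cycle = [((p1_start - 1 + (i + 1) * (9 * i + 6)) % 10) + 1 for i in range(10)]
--     p2_cycle = [((p2_start - 1 + (i + 1) * (9 * i + 15)) % 10) + 1 for i in range(10)]
--     return p1_cycle, p2_cycle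
-- ===== Notes on version B (the rewrite author's own statement) =====
-- stated objective: simpler
-- what changed: Replaced the precomputed move tables and the sequential loop that threads each position through the previous entry (with a negative-index wraparound at i=0) by an independent per-index closed form: position_i = ((start - 1 + (i+1)*(9*i + c)) % 10) + 1 with c = 6 or 15, the cumulative sum of the arithmetic move sequence.
import Mathlib
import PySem

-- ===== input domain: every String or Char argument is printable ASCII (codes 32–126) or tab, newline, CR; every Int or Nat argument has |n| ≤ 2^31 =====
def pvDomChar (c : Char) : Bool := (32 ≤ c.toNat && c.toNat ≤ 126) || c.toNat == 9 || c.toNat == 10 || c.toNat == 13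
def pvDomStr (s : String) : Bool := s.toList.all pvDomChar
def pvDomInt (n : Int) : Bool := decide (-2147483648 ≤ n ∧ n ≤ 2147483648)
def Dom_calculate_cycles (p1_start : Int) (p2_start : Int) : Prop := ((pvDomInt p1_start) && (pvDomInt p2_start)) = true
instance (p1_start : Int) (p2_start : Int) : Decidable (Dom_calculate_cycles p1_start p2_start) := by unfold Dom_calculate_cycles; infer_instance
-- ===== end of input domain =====

-- ===== PORT A =====
-- B replaces A's sequential accumulation with a per-index closed form for the cumulative move sum.
-- Literal port of A. 'p1_cycle[i-1]' uses Python negative indexing (i-1 = -1 when i = 0): ported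
-- with PySem.List.pyGet?; list assignment 'c[i] = v' for i ∈ 0..9 (nonnegative) is List.set i.toNat.
def calculate_cycles (p1_start : Int) (p2_start : Int) : List Int × List Int :=
  let cycle_length : Int := 10
  let cycle_range := PySem.List.pyRange 0 cycle_length 1
  let moves := fun (j : Int) => cycle_range.map (fun i => PySem.Int.mod ((6 * (i + 1) - j) * 3 - 1) 10 + 1)
  let p1_moves := moves 4
  let p2_moves := moves 1
  let p1_cycle := List.replicate cycle_length.toNat p1_start
  let p2_cycle := List.replicate cycle_length.toNat p2_start
  cycle_range.foldl (fun (st : List Int × List Int) i =>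
    let v1 := PySem.Int.mod ((PySem.List.pyGet? p1_moves i).getD 0 - 1 + (PySem.List.pyGet? st.1 (i - 1)).getD 0) 10 + 1
    let c1 := st.1.set i.toNat v1
    let v2 := PySem.Int.mod ((PySem.List.pyGet? p2_moves i).getD 0 - 1 + (PySem.List.pyGet? st.2 (i - 1)).getD 0) 10 + 1
    (c1, st.2.set i.toNat v2)) (p1_cycle, p2_cycle)

-- ===== PORT B =====
def calculate_cycles_alt (p1_start : Int) (p2_start : Int) : List Int × List Int :=
  ((PySem.List.pyRange 0 10 1).map (fun i => PySem.Int.mod (p1_start - 1 + (i + 1) * (9 * i + 6)) 10 + 1),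
   (PySem.List.pyRange 0 10 1).map (fun i => PySem.Int.mod (p2_start - 1 + (i + 1) * (9 * i + 15)) 10 + 1))

-- ===== PRECONDITION & SPEC =====
def Spec_calculate_cycles (p1_start : Int) (p2_start : Int) (out : List Int × List Int) : Prop := out = calculate_cycles_alt p1_start p2_start
instance (p1_start : Int) (p2_start : Int) (out : List Int × List Int) : Decidable (Spec_calculate_cycles p1_start p2_start out) := by unfold Spec_calculate_cycles; infer_instance

-- ===== CLAIM (what is proved, stated in full; the proofs are below) =====
def Claim_equal_calculate_cycles : Prop := ∀ (p1_start : Int) (p2_start : Int), Dom_calculate_cycles p1_start p2_start → Spec_calculate_cycles p1_start p2_start (calculate_cycles p1_start p2_start)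

-- ===== LEMMAS AND PROOFS =====

-- ===== VERDICT (by name: the statement is the Claim_ definition above) =====
theorem calculate_cycles_spec : Claim_equal_calculate_cycles := by
  intro p1 p2 _
  show calculate_cycles p1 p2 = calculate_cycles_alt p1 p2
  simp [calculate_cycles, calculate_cycles_alt, PySem.List.pyRange, PySem.List.pyGet?,
    PySem.List.pyIdx?, List.range_succ]
  omega
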